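-- pv_equiv track=rewrite | github.com/MouAoZ/TemporaryAxiomTool | scripts/cleanup_temporary_axiom_scaffolding.py | remove_delimited_blocks
-- ===== SOURCE A (Python) =====
-- class CleanupFailure(RuntimeError):
--     pass
--
-- def remove_delimited_blocks(text: str, start_marker: str, end_marker: str) -> tuple[str, int]:
--     lines = text.splitlines(keepends=True)
--     out: list[str] = []
--     idx = 0
--     removed = 0
--     while idx < len(lines):
--         if lines[idx].strip() == start_marker:
--             removed += 1
--             idx += 1
--             while idx < len(lines) and lines[idx].strip() != end_marker:
--                 idx += 1
--             if idx == len(lines):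
--                 raise CleanupFailure(f"Missing end marker {end_marker!r}")
--             idx += 1
--             continue
--         out.append(lines[idx])
--         idx += 1
--     return "".join(out), removed
-- ===== SOURCE B (Python) =====
-- class CleanupFailure(RuntimeError):
--     pass
--
-- def remove_delimited_blocks(text: str, start_marker: str, end_marker: str) -> tuple[str, int]:
--     parts: list[str] = []
--     removed = 0
--     in_block = False
--     for line in text.splitlines(keepends=True):
--         stripped = line.strip()
--         if in_block:
--             in_block = stripped != end_marker
--         elif stripped == start_marker:
--             in_block = True
--             removed += 1
--         else:
--             parts.append(line)
--     if in_block: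
--         raise CleanupFailure(f"Missing end marker {end_marker!r}")
--     return "".join(parts), removed
-- ===== Notes on version B (the rewrite author's own statement) =====
-- stated objective: simpler
-- what changed: Replaces A's outer while with a manual index pointer and a nested inner skip-while by one flat for-loop over the lines with a single boolean in_block state flag.
import Mathlib
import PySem

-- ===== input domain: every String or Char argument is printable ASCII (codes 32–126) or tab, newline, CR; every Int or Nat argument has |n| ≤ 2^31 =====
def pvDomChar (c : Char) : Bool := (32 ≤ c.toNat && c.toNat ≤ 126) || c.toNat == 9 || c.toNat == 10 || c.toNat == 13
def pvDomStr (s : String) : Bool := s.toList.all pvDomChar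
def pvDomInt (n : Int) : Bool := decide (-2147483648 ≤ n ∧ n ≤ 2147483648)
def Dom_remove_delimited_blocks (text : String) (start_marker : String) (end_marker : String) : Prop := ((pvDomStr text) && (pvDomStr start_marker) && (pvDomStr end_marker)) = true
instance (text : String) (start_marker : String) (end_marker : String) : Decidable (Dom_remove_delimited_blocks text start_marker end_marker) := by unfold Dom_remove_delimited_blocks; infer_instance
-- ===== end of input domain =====

-- B is a single flat pass with an `in_block` flag instead of A's nested inner while + manual index;
-- return-value equivalence proved on Pre_ (Python A raises CleanupFailure on unterminated blocks, excluded by Pre_).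

-- str.splitlines(keepends=True), hand-ported (PySem.Str.splitlines drops the ends).
-- Exact on the Dom alphabet: the only Python line breaks among printable ASCII + tab/\n/\r are '\n', '\r' and '\r\n'.
def pvSplitKeep (cur : List Char) : List Char → List (List Char)
  | [] => if cur.isEmpty then [] else [cur.reverse]
  | '\r' :: '\n' :: rest => (cur.reverse ++ ['\r', '\n']) :: pvSplitKeep [] rest
  | '\n' :: rest => (cur.reverse ++ ['\n']) :: pvSplitKeep [] rest
  | '\r' :: rest => (cur.reverse ++ ['\r']) :: pvSplitKeep [] rest
  | c :: rest => pvSplitKeep (c :: cur) rest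

def pvLines (text : String) : List (List Char) := pvSplitKeep [] text.toList

-- ===== PORT A =====
-- inner `while idx < len(lines) and lines[idx].strip() != end_marker`: skip to just past the first end-marker line; none = it ran off the end (Python raises)
def pvSkipTo (em : List Char) : List (List Char) → Option (List (List Char))
  | [] => none
  | l :: rest => if PySem.Chars.strip l = em then some rest else pvSkipTo em rest

theorem pvSkipTo_length {em : List Char} {L L' : List (List Char)} (h : pvSkipTo em L = some L') :
    L'.length < L.length := by
  induction L with
  | nil => simp [pvSkipTo] at h
  | cons l rest ih =>
    simp only [pvSkipTo] at h
    split at h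
    · cases h; simp
    · exact Nat.lt_trans (ih h) (by simp)

-- A's outer while over the remaining lines; (out, removed) is A's loop state.
-- On the `none` branch Python raises CleanupFailure (outside Pre_); the port returns the state accumulated so far.
def pvLoopA (sm em : List Char) (L : List (List Char)) (out : List (List Char)) (removed : Int) :
    List (List Char) × Int :=
  match L with
  | [] => (out, removed)
  | l :: rest =>
    if PySem.Chars.strip l = sm then
      match h : pvSkipTo em rest with
      | none => (out, removed + 1)
      | some rest' => pvLoopA sm em rest' out (removed + 1)
    else pvLoopA sm em rest (out ++ [l]) removed
termination_by L.length
decreasing_by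
  · exact Nat.lt_succ_of_lt (pvSkipTo_length h)
  · simp

def remove_delimited_blocks (text : String) (start_marker : String) (end_marker : String) : String × Int :=
  let r := pvLoopA start_marker.toList end_marker.toList (pvLines text) [] 0
  (String.ofList (PySem.Chars.join [] r.1), r.2)

-- ===== PORT B =====
-- B's single for-loop over the lines with state (in_block, parts, removed).
-- The final Bool is `in_block`; when it is true Python B raises CleanupFailure (outside Pre_).
def pvLoopB (sm em : List Char) (L : List (List Char)) (inBlock : Bool) (parts : List (List Char))
    (removed : Int) : List (List Char) × Int × Bool :=
  match L with
  | [] => (parts, removed, inBlock)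
  | l :: rest =>
    let stripped := PySem.Chars.strip l
    if inBlock then pvLoopB sm em rest (stripped ≠ em) parts removed
    else if stripped = sm then pvLoopB sm em rest true parts (removed + 1)
    else pvLoopB sm em rest false (parts ++ [l]) removed

def remove_delimited_blocks_alt (text : String) (start_marker : String) (end_marker : String) : String × Int :=
  let r := pvLoopB start_marker.toList end_marker.toList (pvLines text) false [] 0
  (String.ofList (PySem.Chars.join [] r.1), r.2.1)

-- ===== PRECONDITION & SPEC =====
-- Pre_ excludes exactly the inputs on which Python A raises CleanupFailure (an unterminated block):
-- with distinct markers, every start-marker line must be followed by a later end-marker line;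
-- with equal markers, the marker lines pair up, so their count must be even.
def Pre_remove_delimited_blocks (text : String) (start_marker : String) (end_marker : String) : Prop :=
  let S := (pvLines text).map PySem.Chars.strip
  if start_marker = end_marker then S.count start_marker.toList % 2 = 0
  else ∀ i < S.length, S[i]? = some start_marker.toList →
    ∃ j < S.length, i < j ∧ S[j]? = some end_marker.toList
instance (text : String) (start_marker : String) (end_marker : String) : Decidable (Pre_remove_delimited_blocks text start_marker end_marker) := by unfold Pre_remove_delimited_blocks; infer_instance

def pvWitness_remove_delimited_blocks : String × String × String :=
  ("keep\nBEGIN\ngone\nEND\ntail\n", "BEGIN", "END")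

def Spec_remove_delimited_blocks (text : String) (start_marker : String) (end_marker : String) (out : String × Int) : Prop := out = remove_delimited_blocks_alt text start_marker end_marker
instance (text : String) (start_marker : String) (end_marker : String) (out : String × Int) : Decidable (Spec_remove_delimited_blocks text start_marker end_marker out) := by unfold Spec_remove_delimited_blocks; infer_instance

-- ===== CLAIM (what is proved, stated in full; the proofs are below) =====
def Claim_equal_remove_delimited_blocks : Prop := ∀ (text : String) (start_marker : String) (end_marker : String), Dom_remove_delimited_blocks text start_marker end_marker → Pre_remove_delimited_blocks text start_marker end_marker → Spec_remove_delimited_blocks text start_marker end_marker (remove_delimited_blocks text start_marker end_marker)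

-- ===== LEMMAS AND PROOFS =====

-- B in `in_block` state is exactly A's inner skip loop.
theorem pvLoopB_inBlock (sm em : List Char) (L : List (List Char)) (parts : List (List Char))
    (removed : Int) :
    pvLoopB sm em L true parts removed =
      match pvSkipTo em L with
      | none => (parts, removed, true)
      | some rest' => pvLoopB sm em rest' false parts removed := by
  induction L with
  | nil => simp [pvLoopB, pvSkipTo]
  | cons l rest ih =>
    simp only [pvLoopB, pvSkipTo]
    by_cases h : PySem.Chars.strip l = em <;> simp [h, ih]

-- The two loop states compute the same (out, removed) everywhere.
theorem pvLoopA_eq_pvLoopB (sm em : List Char) (L : List (List Char)) (out : List (List Char))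
    (removed : Int) :
    pvLoopA sm em L out removed = ((pvLoopB sm em L false out removed).1, (pvLoopB sm em L false out removed).2.1) := by
  fun_induction pvLoopA sm em L out removed with
  | case1 => simp [pvLoopB]
  | case2 out removed l rest hsm hskip =>
    simp [pvLoopB, hsm, hskip, pvLoopB_inBlock]
  | case3 out removed l rest hsm rest' hskip ih =>
    simp [pvLoopB, hsm, hskip, pvLoopB_inBlock, ih]
  | case4 out removed l rest hsm ih =>
    simp [pvLoopB, hsm, ih]

-- ===== VERDICT (by name: the statement is the Claim_ definition above) =====
theorem remove_delimited_blocks_spec : Claim_equal_remove_delimited_blocks := by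
  intro text sm em _ _
  unfold Spec_remove_delimited_blocks remove_delimited_blocks remove_delimited_blocks_alt
  rw [pvLoopA_eq_pvLoopB]
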